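-- pv_equiv track=rewrite | github.com/HaiwenZhang/ZenPCBParser | semantic/adapters/brd.py | _has_top_bottom_names
-- ===== SOURCE A (Python) =====
-- from typing import Iterable
--
-- def _has_top_bottom_names(names: Iterable[str]) -> bool:
--     folded = {name.casefold() for name in names}
--     has_top = any(name == "top" or "top" in name for name in folded)
--     has_bottom = any(
--         name == "bottom" or name == "bot" or "bottom" in name or "bot" in name
--         for name in folded
--     )
--     return has_top and has_bottom
-- ===== SOURCE B (Python) =====
-- def _has_top_bottom_names(names):
--     has_top = False
--     has_bottom = False
--     for name in names:
--         f = name.casefold()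
--         has_top = has_top or "top" in f
--         has_bottom = has_bottom or "bot" in f
--         if has_top and has_bottom:
--             return True
--     return has_top and has_bottom
-- ===== Notes on version B (the rewrite author's own statement) =====
-- stated objective: simpler
-- what changed: Replaces set-materialization plus two full any-scans (with redundant equality and 'bottom' tests subsumed by the substring tests) with a single early-exiting pass maintaining two flags.
import Mathlib
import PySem

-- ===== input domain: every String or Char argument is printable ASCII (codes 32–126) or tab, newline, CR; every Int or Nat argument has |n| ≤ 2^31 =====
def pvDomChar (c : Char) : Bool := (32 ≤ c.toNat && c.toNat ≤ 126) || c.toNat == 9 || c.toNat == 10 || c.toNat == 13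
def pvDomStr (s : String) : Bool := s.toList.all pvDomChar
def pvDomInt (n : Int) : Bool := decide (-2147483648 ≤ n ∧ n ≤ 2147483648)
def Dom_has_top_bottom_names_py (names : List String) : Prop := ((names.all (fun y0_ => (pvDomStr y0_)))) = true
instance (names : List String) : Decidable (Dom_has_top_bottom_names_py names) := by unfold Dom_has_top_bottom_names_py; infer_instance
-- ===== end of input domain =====

-- B replaces A's set-materialization + two any-scans (with redundant equality/'bottom' tests)
-- by a single early-exiting pass over the names maintaining two flags; same return value, not measurably faster.


-- ===== PORT A =====
-- name.casefold() is ported as PySem.Str.lower: exact on the ASCII domain Dom_…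
def has_top_bottom_names_py (names : List String) : Bool :=
  let folded : PySem.Set String := PySem.Set.ofList (names.map (fun name => PySem.Str.lower name))
  let has_top := folded.any (fun name => name == "top" || PySem.Str.isIn "top" name)
  let has_bottom := folded.any (fun name =>
    name == "bottom" || name == "bot" || PySem.Str.isIn "bottom" name || PySem.Str.isIn "bot" name)
  has_top && has_bottom

-- ===== PORT B =====
-- the early-exiting single pass of Source B, as structural recursion over the names with the two flags as state
def hasTBLoop : List String → Bool → Bool → Bool
  | [], has_top, has_bottom => has_top && has_bottom
  | name :: rest, has_top, has_bottom =>
    let f := PySem.Str.lower name   -- casefold: exact on ASCII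
    let has_top' := has_top || PySem.Str.isIn "top" f
    let has_bottom' := has_bottom || PySem.Str.isIn "bot" f
    if has_top' && has_bottom' then true else hasTBLoop rest has_top' has_bottom'

def has_top_bottom_names_py_alt (names : List String) : Bool :=
  hasTBLoop names false false

-- ===== PRECONDITION & SPEC =====
def Spec_has_top_bottom_names_py (names : List String) (out : Bool) : Prop := out = has_top_bottom_names_py_alt names
instance (names : List String) (out : Bool) : Decidable (Spec_has_top_bottom_names_py names out) := by unfold Spec_has_top_bottom_names_py; infer_instance

-- ===== CLAIM (what is proved, stated in full; the proofs are below) =====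
def Claim_equal_has_top_bottom_names_py : Prop := ∀ (names : List String), Dom_has_top_bottom_names_py names → Spec_has_top_bottom_names_py names (has_top_bottom_names_py names)

-- ===== LEMMAS AND PROOFS =====

-- the common normal form both programs compute
def topAny (names : List String) : Bool := names.any (fun n => PySem.Str.isIn "top" (PySem.Str.lower n))
def botAny (names : List String) : Bool := names.any (fun n => PySem.Str.isIn "bot" (PySem.Str.lower n))

-- A's per-element top test collapses to the substring test
lemma top_pred_eq (n : String) :
    (n == "top" || PySem.Str.isIn "top" n) = PySem.Str.isIn "top" n := by
  by_cases h : n = "top"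
  · subst h; decide
  · simp [h]

-- "bot" is an infix of "bottom", so every disjunct of A's bottom test implies the "bot" substring test
lemma bot_pred_eq (n : String) :
    (n == "bottom" || n == "bot" || PySem.Str.isIn "bottom" n || PySem.Str.isIn "bot" n)
      = PySem.Str.isIn "bot" n := by
  cases hbot : PySem.Str.isIn "bot" n with
  | true => simp
  | false =>
    have hnb : n ≠ "bottom" := by rintro rfl; exact absurd hbot (by decide)
    have hnb2 : n ≠ "bot" := by rintro rfl; exact absurd hbot (by decide)
    have hbig : PySem.Str.isIn "bottom" n = false := by
      cases hB : PySem.Str.isIn "bottom" n with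
      | false => rfl
      | true =>
        have h1 := (PySem.Str.isIn_iff_infix _ _).1 hB
        have h2 : ("bot".toList) <:+: n.toList := List.IsInfix.trans (by decide) h1
        have h3 : PySem.Str.isIn "bot" n = true := (PySem.Str.isIn_iff_infix _ _).2 h2
        rw [hbot] at h3; cases h3
    have hbig' : PySem.Chars.isIn ['b','o','t','t','o','m'] n.toList = false := hbig
    simp [hnb, hnb2, hbig']

-- any over set(xs) = any over xs (membership is preserved by Set.ofList)
lemma any_ofList {α : Type} [DecidableEq α] (xs : List α) (p : α → Bool) :
    (PySem.Set.ofList xs).any p = xs.any p := by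
  rw [Bool.eq_iff_iff]
  simp only [List.any_eq_true]
  constructor
  · rintro ⟨x, hx, hp⟩; exact ⟨x, (PySem.Set.mem_ofList _ _).1 hx, hp⟩
  · rintro ⟨x, hx, hp⟩; exact ⟨x, (PySem.Set.mem_ofList _ _).2 hx, hp⟩

lemma A_eq_normal (names : List String) :
    has_top_bottom_names_py names = (topAny names && botAny names) := by
  unfold has_top_bottom_names_py topAny botAny
  simp only [any_ofList, List.any_map, Function.comp_def, top_pred_eq, bot_pred_eq]

lemma loop_eq (names : List String) (ht hb : Bool) :
    hasTBLoop names ht hb = ((ht || topAny names) && (hb || botAny names)) := by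
  induction names generalizing ht hb with
  | nil => simp [hasTBLoop, topAny, botAny]
  | cons n rest ih =>
    simp only [hasTBLoop, topAny, botAny, List.any_cons]
    split
    · next h =>
      rw [Bool.and_eq_true, Bool.or_eq_true, Bool.or_eq_true] at h
      obtain ⟨h1, h2⟩ := h
      rcases h1 with h1 | h1 <;> rcases h2 with h2 | h2 <;> simp_all
    · next h =>
      rw [ih]
      unfold topAny botAny
      simp only [Bool.or_assoc]

lemma B_eq_normal (names : List String) :
    has_top_bottom_names_py_alt names = (topAny names && botAny names) := by
  unfold has_top_bottom_names_py_alt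
  rw [loop_eq]; simp only [Bool.false_or]

-- ===== VERDICT (by name: the statement is the Claim_ definition above) =====
theorem has_top_bottom_names_py_spec : Claim_equal_has_top_bottom_names_py := by
  intro names _
  unfold Spec_has_top_bottom_names_py
  rw [A_eq_normal, B_eq_normal]
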